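-- pv_equiv track=rewrite | github.com/EvanChiou/APCS | code/sort.py | xx
-- ===== SOURCE A (Python) =====
-- def xx(lst):
--     if(lst == []):return 0
--     if(len(lst) == 4):
--         if(lst[0] == 0):a = str(lst[1])
--         else:a = str(lst[0]*lst[1])
--         if(lst[2] == 0):b = str(lst[3])
--         else:b = str(lst[2]*lst[3])
--         if(a == '0'):a = ''
--         if(b == '0'):b = ''
--         return xx(list(map(int,list(a+b))))
--     elif(len(lst) == 3):
--         if(lst[0] == 0):a = str(lst[1])
--         else:a = str(lst[0]*lst[1])
--         if(lst[1] == 0):b = str(lst[2])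
--         else:b = str(lst[1]*lst[2])
--         if(a == '0'):a = ''
--         if(b == '0'):b = ''
--         return xx(list(map(int,list(a+b))))
--     elif(len(lst) == 2):
--         return xx(list(map(int,list(str(lst[0]*lst[1])))))
--     elif(len(lst) == 1):
--         return lst[0]
-- ===== SOURCE B (Python) =====
-- def xx(lst):
--     # Iterative reduction: one explicit state loop instead of recursion;
--     # the two length-3/4 factor pairs are merged into values x, y first.
--     while len(lst) >= 2:
--         if len(lst) > 4:
--             return None  # unsupported length, as in the original fall-through
--         if len(lst) == 2:
--             s = str(lst[0] * lst[1])
--         else: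
--             x = lst[1] if lst[0] == 0 else lst[0] * lst[1]
--             if len(lst) == 4:
--                 y = lst[3] if lst[2] == 0 else lst[2] * lst[3]
--             else:
--                 y = lst[2] if lst[1] == 0 else lst[1] * lst[2]
--             a, b = str(x), str(y)
--             if a == '0':
--                 a = ''
--             if b == '0':
--                 b = ''
--             s = a + b
--         lst = [int(c) for c in s]
--     return lst[0] if lst else 0
-- ===== Notes on version B (the rewrite author's own statement) =====
-- stated objective: alternative
-- what changed: Replaces the self-recursion by an explicit while-loop over the current list state, merging the length-3 and length-4 branches into one value-level computation of the two factors before string conversion.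
-- outside the precondition, e.g. on xx([1, 2, 3, 4, 5]): A returns None, B returns None; on xx([-1, 2]): A raises ValueError, B raises ValueError; on xx([99, 99, 99]): A returns None, B returns None
import Mathlib
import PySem

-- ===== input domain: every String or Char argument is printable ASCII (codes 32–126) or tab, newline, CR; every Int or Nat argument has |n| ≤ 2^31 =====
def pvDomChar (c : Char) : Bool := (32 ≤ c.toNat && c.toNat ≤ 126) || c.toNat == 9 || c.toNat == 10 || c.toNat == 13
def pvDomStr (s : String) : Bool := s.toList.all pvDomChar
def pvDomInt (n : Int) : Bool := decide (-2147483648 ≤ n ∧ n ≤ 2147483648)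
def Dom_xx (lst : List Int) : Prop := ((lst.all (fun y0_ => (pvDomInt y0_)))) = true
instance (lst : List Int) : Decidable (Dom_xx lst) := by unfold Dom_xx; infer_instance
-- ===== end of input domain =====

-- B replaces A's self-recursion by an explicit while-loop over the list state,
-- merging the length-3/4 factor pairs into value-level computations (objective: alternative decomposition).

-- shared helper: list(map(int, list(s))) — int(c) per char, none = ValueError
def pvParse : List Char → Option (List Int)
  | [] => some []
  | c :: cs =>
    match PySem.Int.ofChars? [c], pvParse cs with
    | some d, some ds => some (d :: ds)
    | _, _ => none

-- ===== PORT A =====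
-- literal transliteration of A's recursion; fuel only makes it total (unused fuel-0 arm returns 0,
-- never reached on Pre_ inputs)
def xxGo : Nat → List Int → Int
  | 0, _ => 0
  | f+1, lst =>
    if lst = [] then 0
    else
      match lst with
      | [p, q, r, s] =>
        let a := if p = 0 then PySem.Int.toChars q else PySem.Int.toChars (p*q)
        let b := if r = 0 then PySem.Int.toChars s else PySem.Int.toChars (r*s)
        let a := if a = ['0'] then [] else a
        let b := if b = ['0'] then [] else b
        match pvParse (a ++ b) with
        | some next => xxGo f next
        | none => 0
      | [p, q, r] =>
        let a := if p = 0 then PySem.Int.toChars q else PySem.Int.toChars (p*q)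
        let b := if q = 0 then PySem.Int.toChars r else PySem.Int.toChars (q*r)
        let a := if a = ['0'] then [] else a
        let b := if b = ['0'] then [] else b
        match pvParse (a ++ b) with
        | some next => xxGo f next
        | none => 0
      | [p, q] =>
        match pvParse (PySem.Int.toChars (p*q)) with
        | some next => xxGo f next
        | none => 0
      | [_] => lst.headI
      | _ => 0

def xx (lst : List Int) : Int := xxGo 1000 lst

-- ===== PORT B =====
-- transliteration of Source B's while-loop; fuel only makes the loop total
def xxLoop : Nat → List Int → Int
  | 0, _ => 0
  | f+1, lst =>
    if 2 ≤ lst.length then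
      if 4 < lst.length then 0
      else
        let s :=
          match lst with
          | [p, q] => PySem.Int.toChars (p*q)
          | p :: q :: rest =>
            let x := if p = 0 then q else p * q
            let y :=
              match rest with
              | [r, t] => if r = 0 then t else r * t
              | [r] => if q = 0 then r else q * r
              | _ => 0
            let a := PySem.Int.toChars x
            let b := PySem.Int.toChars y
            (if a = ['0'] then [] else a) ++ (if b = ['0'] then [] else b)
          | _ => []
        match pvParse s with
        | some next => xxLoop f next
        | none => 0
    else
      match lst with
      | [] => 0
      | p :: _ => p

def xx_alt (lst : List Int) : Int := xxLoop 1000 lst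

-- ===== PRECONDITION & SPEC =====
-- digit-string length of a nonnegative value after the '0'→'' blanking (capped at 5)
def pvDLen (v : Int) : Nat :=
  if v ≤ 0 then 0 else if v ≤ 9 then 1 else if v ≤ 99 then 2
  else if v ≤ 999 then 3 else if v ≤ 9999 then 4 else 5

-- Pre_ admits EXACTLY the inputs on which A returns an int: it excludes lists of length ≥ 5
-- (A falls through returning None, not an Int) and lists whose first-step factors are negative
-- or whose concatenated blanked digit strings exceed 4 characters, on which A raises ValueError
-- on int('-') or returns None one step deeper in the recursion.
def pvOk2 (x y : Int) : Bool := 0 ≤ x && 0 ≤ y && pvDLen x + pvDLen y ≤ 4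
def Pre_xx (lst : List Int) : Prop :=
  lst.length ≤ 1 ∨
  (lst.length = 2 ∧ 0 ≤ lst.getD 0 0 * lst.getD 1 0 ∧ lst.getD 0 0 * lst.getD 1 0 ≤ 9999) ∨
  (lst.length = 3 ∧
    pvOk2 (if lst.getD 0 0 = 0 then lst.getD 1 0 else lst.getD 0 0 * lst.getD 1 0)
          (if lst.getD 1 0 = 0 then lst.getD 2 0 else lst.getD 1 0 * lst.getD 2 0) = true) ∨
  (lst.length = 4 ∧
    pvOk2 (if lst.getD 0 0 = 0 then lst.getD 1 0 else lst.getD 0 0 * lst.getD 1 0)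
          (if lst.getD 2 0 = 0 then lst.getD 3 0 else lst.getD 2 0 * lst.getD 3 0) = true)
instance (lst : List Int) : Decidable (Pre_xx lst) := by unfold Pre_xx; infer_instance

def pvWitness_xx : List Int := [12, 3, 1]

def Spec_xx (lst : List Int) (out : Int) : Prop := out = xx_alt lst
instance (lst : List Int) (out : Int) : Decidable (Spec_xx lst out) := by unfold Spec_xx; infer_instance

-- ===== CLAIM (what is proved, stated in full; the proofs are below) =====
def Claim_equal_xx : Prop := ∀ (lst : List Int), Dom_xx lst → Pre_xx lst → Spec_xx lst (xx lst)

-- ===== LEMMAS AND PROOFS =====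

-- the two ports agree for EVERY fuel and EVERY list (Pre_ is only needed for faithfulness to Python)
theorem xxGo_eq_xxLoop : ∀ (f : Nat) (lst : List Int), xxGo f lst = xxLoop f lst := by
  intro f
  induction f with
  | zero => intro lst; rfl
  | succ f ih =>
    intro lst
    match lst with
    | [] => simp [xxGo, xxLoop]
    | [p] => simp [xxGo, xxLoop]
    | [p, q] =>
      simp only [xxGo, xxLoop]
      norm_num
      cases pvParse (PySem.Int.toChars (p*q)) <;> simp [ih]
    | [p, q, r] =>
      simp only [xxGo, xxLoop]
      norm_num
      by_cases hp : p = 0 <;> by_cases hq : q = 0 <;>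
        (simp only [hp, hq, if_true, if_false] <;>
         (generalize pvParse _ = o; cases o <;> simp [ih]))
    | [p, q, r, t] =>
      simp only [xxGo, xxLoop]
      norm_num
      by_cases hp : p = 0 <;> by_cases hr : r = 0 <;>
        (simp only [hp, hr, if_true, if_false] <;>
         (generalize pvParse _ = o; cases o <;> simp [ih]))
    | p :: q :: r :: t :: u :: rest =>
      simp only [xxGo, xxLoop]
      norm_num

-- ===== VERDICT =====
theorem xx_spec : Claim_equal_xx := by
  intro lst _ _
  unfold Spec_xx xx xx_alt
  exact xxGo_eq_xxLoop 1000 lst
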